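-- pv_equiv track=rewrite | github.com/luiisao20/xB_Philosophy | prueba2.py | get_sum_item_for_teams
-- ===== SOURCE A (Python) =====
-- def get_sum_item_for_teams(item):
--     e = 0
--     f = 4
--     item_total = []
--     for c in range(12):
--         d = slice(e, f)
--         item_total.append(sum(item[d]))
--         e += 4
--         f += 4
--     return item_total
-- ===== SOURCE B (Python) =====
-- def get_sum_item_for_teams(item):
--     def go(xs, k):
--         if k == 0:
--             return []
--         return [sum(xs[:4])] + go(xs[4:], k - 1)
--     return go(item, 12)
-- ===== Notes on version B (the rewrite author's own statement) =====
-- stated objective: alternative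
-- what changed: Replaces the index-arithmetic loop (e/f counters, 12 slice(e,f) views into the original list) with a structural recursion that peels off the 4-element prefix and recurses on the rest 12 times.
import Mathlib
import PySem

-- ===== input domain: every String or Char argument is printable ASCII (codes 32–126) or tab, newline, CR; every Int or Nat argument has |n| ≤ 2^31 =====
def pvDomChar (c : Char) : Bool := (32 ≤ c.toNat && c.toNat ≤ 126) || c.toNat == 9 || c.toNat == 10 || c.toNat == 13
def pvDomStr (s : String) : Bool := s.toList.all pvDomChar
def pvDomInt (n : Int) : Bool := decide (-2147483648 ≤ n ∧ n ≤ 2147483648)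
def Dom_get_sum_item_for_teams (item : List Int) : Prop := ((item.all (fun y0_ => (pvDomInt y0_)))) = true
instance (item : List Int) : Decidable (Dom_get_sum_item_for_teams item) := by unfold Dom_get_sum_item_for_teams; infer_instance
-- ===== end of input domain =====

-- B replaces A's index-arithmetic loop (e/f counters, 12 slice(e,f) views) by a structural
-- recursion peeling the 4-element prefix 12 times; objective: alternative decomposition.

-- ===== PORT A =====
def get_sum_item_for_teams (item : List Int) : List Int :=
  let st := (PySem.List.pyRange 0 12 1).foldl
    (fun (st : Int × Int × List Int) _c =>
      let e := st.1
      let f := st.2.1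
      let item_total := st.2.2
      let d := PySem.List.slice item (some e) (some f)
      (e + 4, f + 4, item_total ++ [d.sum]))
    ((0 : Int), (4 : Int), ([] : List Int))
  st.2.2

-- ===== PORT B =====
def goChunks (xs : List Int) (k : Nat) : List Int :=
  match k with
  | 0 => []
  | Nat.succ k' =>
      [(PySem.List.slice xs none (some 4)).sum] ++
        goChunks (PySem.List.slice xs (some 4) none) k'

def get_sum_item_for_teams_alt (item : List Int) : List Int := goChunks item 12

-- ===== PRECONDITION & SPEC =====
def Spec_get_sum_item_for_teams (item : List Int) (out : List Int) : Prop := out = get_sum_item_for_teams_alt item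
instance (item : List Int) (out : List Int) : Decidable (Spec_get_sum_item_for_teams item out) := by unfold Spec_get_sum_item_for_teams; infer_instance

-- ===== CLAIM (what is proved, stated in full; the proofs are below) =====
def Claim_equal_get_sum_item_for_teams : Prop := ∀ (item : List Int), Dom_get_sum_item_for_teams item → Spec_get_sum_item_for_teams item (get_sum_item_for_teams item)

-- ===== LEMMAS AND PROOFS =====
-- ===== VERDICT (by name: the statement is the Claim_ definition above) =====
theorem get_sum_item_for_teams_spec : Claim_equal_get_sum_item_for_teams := by
  intro item _
  unfold Spec_get_sum_item_for_teams get_sum_item_for_teams get_sum_item_for_teams_alt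
  simp [goChunks, PySem.List.pyRange, PySem.List.slice_to, PySem.List.slice_from,
    List.drop_drop, List.range_succ, PySem.List.slice_toNat]
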